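-- pv_equiv track=rewrite | github.com/handler9/NOTA-Benchmark | scripts/analyze-results/variance_test_all_runs.py | find_answer_column
-- ===== SOURCE A (Python) =====
-- def find_answer_column(columns):
--     # Prefer *_choice columns (claude_choice, gpt_choice, etc.)
--     choice_cols = [c for c in columns if c.lower().endswith("_choice")]
--     if choice_cols:
--         return choice_cols[0]
--
--     # Fallbacks
--     for c in ["model_answer", "answer"]:
--         if c in columns:
--             return c
--
--     return None
-- ===== SOURCE B (Python) =====
-- def find_answer_column(columns):
--     # Single priority-driven pass: rank 0 = *_choice, 1 = model_answer, 2 = answer.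
--     best = None
--     best_rank = 3
--     for c in columns:
--         if c.lower().endswith("_choice"):
--             r = 0
--         elif c == "model_answer":
--             r = 1
--         elif c == "answer":
--             r = 2
--         else:
--             r = 3
--         if r < best_rank:
--             best = c
--             best_rank = r
--     return best
-- ===== Notes on version B (the rewrite author's own statement) =====
-- stated objective: alternative
-- what changed: Replaces A's filter pass plus a separate membership scan for each fallback name with one priority-ranked pass that keeps the best candidate (smallest rank, earliest index).
import Mathlib
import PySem

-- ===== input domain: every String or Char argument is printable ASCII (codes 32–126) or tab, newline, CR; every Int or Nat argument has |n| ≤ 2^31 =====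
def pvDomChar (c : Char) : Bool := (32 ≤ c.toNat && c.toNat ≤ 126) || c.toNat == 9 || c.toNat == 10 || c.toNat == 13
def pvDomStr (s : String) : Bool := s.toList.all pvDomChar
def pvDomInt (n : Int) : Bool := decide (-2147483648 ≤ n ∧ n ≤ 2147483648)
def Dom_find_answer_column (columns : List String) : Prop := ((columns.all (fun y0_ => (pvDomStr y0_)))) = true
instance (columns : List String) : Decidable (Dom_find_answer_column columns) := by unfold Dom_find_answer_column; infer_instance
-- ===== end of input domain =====

-- B replaces A's filter pass plus separate fallback scan by one priority-ranked pass (alternative decomposition, same cost).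


-- ===== PORT A =====
-- c.lower().endswith("_choice")
def pvIsChoice (c : String) : Bool := PySem.Str.endswith (PySem.Str.lower c) "_choice"

-- 'for c in ["model_answer", "answer"]: if c in columns: return c' / 'return None'
def pvFallbackLoop (columns : List String) : List String → Option String
  | [] => none
  | c :: rest => if columns.contains c then some c else pvFallbackLoop columns rest

def find_answer_column (columns : List String) : Option String :=
  let choice_cols := columns.filter pvIsChoice
  match choice_cols with
  | c :: _ => some c
  | [] => pvFallbackLoop columns ["model_answer", "answer"]

-- ===== PORT B =====
def pvRank (c : String) : Nat :=
  if pvIsChoice c then 0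
  else if c = "model_answer" then 1
  else if c = "answer" then 2
  else 3

def pvStep (st : Option String × Nat) (c : String) : Option String × Nat :=
  if pvRank c < st.2 then (some c, pvRank c) else st

def find_answer_column_alt (columns : List String) : Option String :=
  (columns.foldl pvStep (none, 3)).1

-- ===== PRECONDITION & SPEC =====
def Spec_find_answer_column (columns : List String) (out : Option String) : Prop := out = find_answer_column_alt columns
instance (columns : List String) (out : Option String) : Decidable (Spec_find_answer_column columns out) := by unfold Spec_find_answer_column; infer_instance

-- ===== CLAIM (what is proved, stated in full; the proofs are below) =====
def Claim_equal_find_answer_column : Prop := ∀ (columns : List String), Dom_find_answer_column columns → Spec_find_answer_column columns (find_answer_column columns)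

-- ===== LEMMAS AND PROOFS =====
theorem pvFold_frozen (l : List String) (b : Option String) :
    l.foldl pvStep (b, 0) = (b, 0) := by
  induction l with
  | nil => rfl
  | cons c rest ih => simp [List.foldl, pvStep, ih]

theorem pvFold_char (l : List String) (b : Option String) (k : Nat) (hk : 0 < k) (hk3 : k ≤ 3) :
    (l.foldl pvStep (b, k)).1 =
      match l.find? pvIsChoice with
      | some d => some d
      | none =>
        if 1 < k ∧ "model_answer" ∈ l then some "model_answer"
        else if 2 < k ∧ "answer" ∈ l then some "answer"
        else b := by
  induction l generalizing b k with
  | nil => simp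
  | cons c rest ih =>
    by_cases hp : pvIsChoice c
    · have hstep : pvStep (b, k) c = (some c, 0) := by simp [pvStep, pvRank, hp, hk]
      rw [List.foldl_cons, hstep, pvFold_frozen]
      simp [List.find?, hp]
    · by_cases hm : c = "model_answer"
      · subst hm
        by_cases h1 : 1 < k
        · have hstep : pvStep (b, k) "model_answer" = (some "model_answer", 1) := by
            simp [pvStep, pvRank, hp, h1]
          rw [List.foldl_cons, hstep, ih _ 1 (by omega) (by omega)]
          simp [List.find?, hp, h1]
        · have hk1 : k = 1 := by omega
          subst hk1
          have hstep : pvStep (b, 1) "model_answer" = (b, 1) := by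
            simp [pvStep, pvRank, hp]
          rw [List.foldl_cons, hstep, ih _ 1 (by omega) (by omega)]
          simp [List.find?, hp]
      · by_cases ha : c = "answer"
        · subst ha
          by_cases h2 : 2 < k
          · have hstep : pvStep (b, k) "answer" = (some "answer", 2) := by
              simp [pvStep, pvRank, hp, hm, h2]
            rw [List.foldl_cons, hstep, ih _ 2 (by omega) (by omega)]
            have h1 : 1 < k := by omega
            cases hfd : rest.find? pvIsChoice with
            | some d => simp [List.find?, hp, hfd]
            | none =>
              by_cases hmem : ("model_answer" : String) ∈ rest <;>
                simp [List.find?, hp, hfd, hmem, h1, h2]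
          · have hstep : pvStep (b, k) "answer" = (b, k) := by
              simp [pvStep, pvRank, hp, hm, h2]
            rw [List.foldl_cons, hstep, ih _ k hk hk3]
            cases hfd : rest.find? pvIsChoice with
            | some d => simp [List.find?, hp, hfd]
            | none =>
              by_cases h1 : 1 < k <;>
                by_cases hmem : ("model_answer" : String) ∈ rest <;>
                  simp [List.find?, hp, hfd, hmem, h1, h2]
        · have hstep : pvStep (b, k) c = (b, k) := by
            have : pvRank c = 3 := by simp [pvRank, hp, hm, ha]
            simp [pvStep, this]; omega
          rw [List.foldl_cons, hstep, ih _ k hk hk3]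
          cases hfd : rest.find? pvIsChoice with
          | some d => simp [List.find?, hp, hfd]
          | none =>
            by_cases h1 : 1 < k <;> by_cases h2 : 2 < k <;>
              simp [List.find?, hp, hfd, h1, h2, Ne.symm hm, Ne.symm ha, List.mem_cons]

theorem pvFilterHead (l : List String) :
    (l.filter pvIsChoice).head? = l.find? pvIsChoice := by
  induction l with
  | nil => rfl
  | cons c rest ih =>
    by_cases hp : pvIsChoice c <;> simp [List.filter, List.find?, hp, ih]

theorem find_answer_column_spec : Claim_equal_find_answer_column := by
  intro columns _
  unfold Spec_find_answer_column find_answer_column find_answer_column_alt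
  rw [pvFold_char columns none 3 (by omega) (by omega)]
  have hhead := pvFilterHead columns
  cases hfd : columns.find? pvIsChoice with
  | some d =>
    rw [hfd] at hhead
    rcases hf : columns.filter pvIsChoice with _ | ⟨c, rest⟩
    · simp [hf] at hhead
    · simp [hf] at hhead
      simp [hhead]
  | none =>
    rw [hfd] at hhead
    rcases hf : columns.filter pvIsChoice with _ | ⟨c, rest⟩
    · by_cases hm : ("model_answer" : String) ∈ columns <;>
        by_cases ha : ("answer" : String) ∈ columns <;>
          simp [pvFallbackLoop, hm, ha]
    · simp [hf] at hhead
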